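-- pv_equiv track=rewrite | github.com/Agentic-Environmental-Engineering/GymVerse | gem/gem/envs/example/logic_LexMinModelFinder_LowHighPairsEnv_GEM_env.py | _is_clause_false_under_partial
-- ===== SOURCE A (Python) =====
-- from typing import Tuple, Dict, Any, Optional, List, Set
--
-- def _is_clause_false_under_partial(clause: List[int], partial: List[Optional[int]]) -> bool:
--     # Clause false if all literals are assigned and all evaluate to False
--     all_false = True
--     for lit in clause:
--         idx = abs(lit) - 1
--         v = partial[idx]
--         if v is None:
--             all_false = False
--             # literal could still be True later
--         else:
--             lit_true = (lit > 0 and v == 1) or (lit < 0 and v == 0)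
--             if lit_true:
--                 return False
--     return all_false
-- ===== SOURCE B (Python) =====
-- from typing import List, Optional
--
-- def _is_clause_false_under_partial(clause: List[int], partial: List[Optional[int]]) -> bool:
--     # Clause is false iff every literal is assigned AND no literal is satisfied.
--     if any(partial[abs(lit) - 1] is None for lit in clause):
--         return False
--     return not any(
--         (lit > 0 and partial[abs(lit) - 1] == 1) or (lit < 0 and partial[abs(lit) - 1] == 0)
--         for lit in clause
--     )
-- ===== Notes on version B (the rewrite author's own statement) =====
-- stated objective: simpler
-- what changed: Replaces A's single flag-carrying loop with early return by two independent predicate passes: 'some literal unassigned -> False' then 'some literal satisfied -> False', else True.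
-- outside the precondition, e.g. on _is_clause_false_under_partial([1, 5], [1]): A returns False, B raises IndexError
import Mathlib
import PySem

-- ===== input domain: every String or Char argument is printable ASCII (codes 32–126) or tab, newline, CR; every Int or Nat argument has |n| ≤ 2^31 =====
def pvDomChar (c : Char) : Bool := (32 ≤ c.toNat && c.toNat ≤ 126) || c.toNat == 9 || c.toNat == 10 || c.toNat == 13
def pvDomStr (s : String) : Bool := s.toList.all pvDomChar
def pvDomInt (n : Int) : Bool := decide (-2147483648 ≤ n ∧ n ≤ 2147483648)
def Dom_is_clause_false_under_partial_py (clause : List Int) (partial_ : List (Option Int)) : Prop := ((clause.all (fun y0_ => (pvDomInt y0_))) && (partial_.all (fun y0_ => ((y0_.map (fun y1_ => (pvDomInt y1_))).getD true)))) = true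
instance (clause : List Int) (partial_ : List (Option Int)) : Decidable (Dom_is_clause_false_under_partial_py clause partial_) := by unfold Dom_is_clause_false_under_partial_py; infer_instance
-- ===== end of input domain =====

-- B replaces A's single flag-carrying early-return loop by two independent predicate
-- passes ("some literal unassigned" / "some literal satisfied"); simpler, same cost.


-- ===== PORT A =====
-- A's loop: carries the all_false flag, returns False immediately on a satisfied literal.
def isClauseFalseGo (partial_ : List (Option Int)) : List Int → Bool → Bool
  | [], allFalse => allFalse
  | lit :: rest, allFalse =>
    match PySem.List.pyGet? partial_ (|lit| - 1) with
    | none => false  -- IndexError; excluded by Pre_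
    | some none => isClauseFalseGo partial_ rest false
    | some (some v) =>
      if (lit > 0 && v == 1) || (lit < 0 && v == 0) then false
      else isClauseFalseGo partial_ rest allFalse

def is_clause_false_under_partial_py (clause : List Int) (partial_ : List (Option Int)) : Bool :=
  isClauseFalseGo partial_ clause true

-- ===== PORT B =====
def is_clause_false_under_partial_py_alt (clause : List Int) (partial_ : List (Option Int)) : Bool :=
  if clause.any (fun lit =>
      match PySem.List.pyGet? partial_ (|lit| - 1) with
      | some none => true
      | _ => false) then
    false
  else
    ! clause.any (fun lit =>
      match PySem.List.pyGet? partial_ (|lit| - 1) with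
      | some (some v) => (lit > 0 && v == 1) || (lit < 0 && v == 0)
      | _ => false)

-- ===== PRECONDITION & SPEC =====
-- Pre_ excludes exactly the inputs where some literal's index abs(lit)-1 is out of range
-- for partial (an IndexError in B and, unless A early-returns on an earlier satisfied
-- literal, in A as well; the early-return case is a defensible-corner artefact of A's
-- single-pass evaluation order that B's two-pass algorithm cannot reach).
def Pre_is_clause_false_under_partial_py (clause : List Int) (partial_ : List (Option Int)) : Prop :=
  ∀ lit ∈ clause, PySem.Raise.InRange partial_.length (|lit| - 1)
instance (clause : List Int) (partial_ : List (Option Int)) : Decidable (Pre_is_clause_false_under_partial_py clause partial_) := by unfold Pre_is_clause_false_under_partial_py; infer_instance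
def pvWitness_is_clause_false_under_partial_py : List Int × List (Option Int) := ([1, -2], [some 0, none])

def Spec_is_clause_false_under_partial_py (clause : List Int) (partial_ : List (Option Int)) (out : Bool) : Prop := out = is_clause_false_under_partial_py_alt clause partial_
instance (clause : List Int) (partial_ : List (Option Int)) (out : Bool) : Decidable (Spec_is_clause_false_under_partial_py clause partial_ out) := by unfold Spec_is_clause_false_under_partial_py; infer_instance

-- ===== CLAIM (what is proved, stated in full; the proofs are below) =====
def Claim_equal_is_clause_false_under_partial_py : Prop := ∀ (clause : List Int) (partial_ : List (Option Int)), Dom_is_clause_false_under_partial_py clause partial_ → Pre_is_clause_false_under_partial_py clause partial_ → Spec_is_clause_false_under_partial_py clause partial_ (is_clause_false_under_partial_py clause partial_)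

-- ===== LEMMAS AND PROOFS =====

-- A's loop equals: false if some literal is satisfied, else the flag ANDed with
-- "no literal is unassigned".
theorem isClauseFalseGo_eq (partial_ : List (Option Int)) (clause : List Int) (acc : Bool)
    (h : ∀ lit ∈ clause, PySem.Raise.InRange partial_.length (|lit| - 1)) :
    isClauseFalseGo partial_ clause acc =
      (if clause.any (fun lit =>
          match PySem.List.pyGet? partial_ (|lit| - 1) with
          | some (some v) => (lit > 0 && v == 1) || (lit < 0 && v == 0)
          | _ => false) then false
       else acc && ! clause.any (fun lit =>
          match PySem.List.pyGet? partial_ (|lit| - 1) with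
          | some none => true
          | _ => false)) := by
  induction clause generalizing acc with
  | nil => simp [isClauseFalseGo]
  | cons lit rest ih =>
    have hlit : PySem.Raise.InRange partial_.length (|lit| - 1) := h lit (by simp)
    have hrest : ∀ l ∈ rest, PySem.Raise.InRange partial_.length (|l| - 1) :=
      fun l hl => h l (by simp [hl])
    have hsome : PySem.List.pyGet? partial_ (|lit| - 1) ≠ none := by
      intro hn; rw [PySem.List.pyGet?_eq_none_iff] at hn; exact hn hlit
    rcases hv : PySem.List.pyGet? partial_ (|lit| - 1) with _ | (_ | v)
    · exact absurd hv hsome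
    · simp only [isClauseFalseGo, hv, ih false hrest, List.any_cons]
      split_ifs with h1 h2 h3 <;> simp_all
    · simp only [isClauseFalseGo, hv, List.any_cons]
      by_cases hs : ((lit > 0 && v == 1) || (lit < 0 && v == 0)) = true
      · simp [hs]
      · simp only [hs, Bool.false_or, ih acc hrest]
        simp at hs
        split_ifs <;> simp_all

-- ===== VERDICT (by name: the statement is the Claim_ definition above) =====
theorem is_clause_false_under_partial_py_spec : Claim_equal_is_clause_false_under_partial_py := by
  intro clause partial_ _ hpre
  unfold Spec_is_clause_false_under_partial_py is_clause_false_under_partial_py is_clause_false_under_partial_py_alt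
  rw [isClauseFalseGo_eq partial_ clause true hpre]
  split_ifs with h1 h2 h3
  · rfl
  · simp_all
  · simp_all
  · simp only [Bool.not_eq_true] at h1 h3
    rw [h1, h3]
    simp
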